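-- pv_equiv track=rewrite | github.com/gedin-eth/gdfs-data | scripts/4_analyze_lineups.py | parse_lineup
-- ===== SOURCE A (Python) =====
-- def parse_lineup(lineup_str):
--     positions = ['C', 'F', 'G', 'PF', 'PG', 'SF', 'SG', 'UTIL']
--     players = []
--     parts = lineup_str.split()
--     for i, part in enumerate(parts):
--         if part in positions:
--             if i + 1 < len(parts):
--                 name_parts = []
--                 j = i + 1
--                 while j < len(parts) and parts[j] not in positions:
--                     name_parts.append(parts[j])
--                     j += 1
--                 if name_parts:
--                     players.append(' '.join(name_parts))
--     return players
-- ===== SOURCE B (Python) =====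
-- def parse_lineup(lineup_str):
--     positions = ['C', 'F', 'G', 'PF', 'PG', 'SF', 'SG', 'UTIL']
--     players = []
--     current = []
--     active = False
--     for tok in lineup_str.split():
--         if tok in positions:
--             if active and current:
--                 players.append(' '.join(current))
--             current = []
--             active = True
--         elif active:
--             current.append(tok)
--     if active and current:
--         players.append(' '.join(current))
--     return players
-- ===== Notes on version B (the rewrite author's own statement) =====
-- stated objective: alternative
-- what changed: Replaces the nested scan (for each position token, an inner while re-reading the following tokens) by a single linear pass that accumulates the current name parts and flushes them at each position token and once at the end.
import Mathlib
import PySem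

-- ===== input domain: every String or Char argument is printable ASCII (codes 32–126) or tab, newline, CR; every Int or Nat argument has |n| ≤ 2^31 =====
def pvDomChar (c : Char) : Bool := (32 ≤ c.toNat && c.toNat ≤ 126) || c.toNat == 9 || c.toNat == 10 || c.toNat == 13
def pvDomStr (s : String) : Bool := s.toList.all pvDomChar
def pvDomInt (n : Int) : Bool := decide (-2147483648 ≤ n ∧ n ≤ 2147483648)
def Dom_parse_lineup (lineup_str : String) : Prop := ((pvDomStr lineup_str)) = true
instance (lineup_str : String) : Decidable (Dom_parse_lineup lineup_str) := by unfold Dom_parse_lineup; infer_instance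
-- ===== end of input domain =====

-- B replaces A's nested rescans (inner while per position token) by one linear pass with an accumulator that flushes at each position token.

-- ===== PORT A =====
def pvPositions : List String := ["C", "F", "G", "PF", "PG", "SF", "SG", "UTIL"]

-- inner `while j < len(parts) and parts[j] not in positions: name_parts.append(parts[j]); j += 1`
def pvCollectA (parts : List String) (j : Nat) : List String :=
  if h : j < parts.length then
    if parts[j] ∈ pvPositions then []
    else parts[j] :: pvCollectA parts (j + 1)
  else []
termination_by parts.length - j

-- `for i, part in enumerate(parts)` as recursion on the index i
def pvLoopA (parts : List String) (i : Nat) (players : List String) : List String :=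
  if h : i < parts.length then
    let part := parts[i]
    let players' :=
      if part ∈ pvPositions then
        if i + 1 < parts.length then
          let name_parts := pvCollectA parts (i + 1)
          if name_parts ≠ [] then players ++ [PySem.Str.join " " name_parts] else players
        else players
      else players
    pvLoopA parts (i + 1) players'
  else players
termination_by parts.length - i

def parse_lineup (lineup_str : String) : List String :=
  pvLoopA (PySem.Str.split₀ lineup_str) 0 []

-- ===== PORT B =====
-- loop body of B: flush on a position token, otherwise accumulate when active
def pvStepB (st : List String × List String × Bool) (tok : String) : List String × List String × Bool :=
  if tok ∈ pvPositions then
    ((if st.2.2 ∧ st.2.1 ≠ [] then st.1 ++ [PySem.Str.join " " st.2.1] else st.1), [], true)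
  else if st.2.2 then (st.1, st.2.1 ++ [tok], true)
  else st

def parse_lineup_alt (lineup_str : String) : List String :=
  let st := (PySem.Str.split₀ lineup_str).foldl pvStepB ([], [], false)
  if st.2.2 ∧ st.2.1 ≠ [] then st.1 ++ [PySem.Str.join " " st.2.1] else st.1

-- ===== PRECONDITION & SPEC =====
def Spec_parse_lineup (lineup_str : String) (out : List String) : Prop := out = parse_lineup_alt lineup_str
instance (lineup_str : String) (out : List String) : Decidable (Spec_parse_lineup lineup_str out) := by unfold Spec_parse_lineup; infer_instance

-- ===== CLAIM (what is proved, stated in full; the proofs are below) =====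
def Claim_equal_parse_lineup : Prop := ∀ (lineup_str : String), Dom_parse_lineup lineup_str → Spec_parse_lineup lineup_str (parse_lineup lineup_str)

-- ===== LEMMAS AND PROOFS =====

-- emit a joined name group if non-empty
def pvEmit (l : List String) : List String := if l ≠ [] then [PySem.Str.join " " l] else []

-- common characterisation of both programs' output
def pvOut : List String → List String
  | [] => []
  | t :: ts => (if t ∈ pvPositions then pvEmit (ts.takeWhile (· ∉ pvPositions)) else []) ++ pvOut ts

-- B's active phase, with the running accumulator
def pvOutAcc (cur : List String) : List String → List String
  | [] => pvEmit cur
  | t :: ts => if t ∈ pvPositions then pvEmit cur ++ pvOutAcc [] ts else pvOutAcc (cur ++ [t]) ts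

-- B's inactive phase
def pvOutI : List String → List String
  | [] => []
  | t :: ts => if t ∈ pvPositions then pvOutAcc [] ts else pvOutI ts

def pvFin (st : List String × List String × Bool) : List String :=
  if st.2.2 ∧ st.2.1 ≠ [] then st.1 ++ [PySem.Str.join " " st.2.1] else st.1

theorem pvCollectA_eq (parts : List String) (j : Nat) :
    pvCollectA parts j = (parts.drop j).takeWhile (· ∉ pvPositions) := by
  have H : ∀ n j, parts.length - j = n →
      pvCollectA parts j = (parts.drop j).takeWhile (· ∉ pvPositions) := by
    intro n
    induction n with
    | zero =>
      intro j hj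
      rw [pvCollectA]
      have h : ¬ j < parts.length := by omega
      rw [List.drop_eq_nil_of_le (by omega)]
      simp [h, List.takeWhile]
    | succ n ih =>
      intro j hj
      have h : j < parts.length := by omega
      rw [pvCollectA]
      rw [List.drop_eq_getElem_cons h, List.takeWhile_cons]
      by_cases hp : parts[j] ∈ pvPositions <;>
        simp [h, hp, ih (j + 1) (by omega)]
  exact H _ j rfl

theorem pvLoopA_eq (parts : List String) (i : Nat) (players : List String) :
    pvLoopA parts i players = players ++ pvOut (parts.drop i) := by
  have H : ∀ n i players, parts.length - i = n →
      pvLoopA parts i players = players ++ pvOut (parts.drop i) := by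
    intro n
    induction n with
    | zero =>
      intro i players hi
      rw [pvLoopA]
      have h : ¬ i < parts.length := by omega
      rw [List.drop_eq_nil_of_le (by omega)]
      simp [h, pvOut]
    | succ n ih =>
      intro i players hi
      have h : i < parts.length := by omega
      rw [pvLoopA]
      simp only [h, dif_pos]
      rw [ih (i + 1) _ (by omega)]
      rw [List.drop_eq_getElem_cons h]
      show (if parts[i] ∈ pvPositions then _ else _) ++ _ = _
      by_cases hp : parts[i] ∈ pvPositions
      · by_cases hlt : i + 1 < parts.length
        · simp only [hp, if_pos, hlt, pvOut, pvCollectA_eq, pvEmit]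
          split <;> simp
        · have hd : parts.drop (i + 1) = [] := List.drop_eq_nil_of_le (by omega)
          simp [hp, hlt, pvOut, hd, pvEmit]
      · simp [hp, pvOut]
  exact H _ i players rfl

theorem pvFoldB_active (ts : List String) :
    ∀ players cur, pvFin (ts.foldl pvStepB (players, cur, true)) = players ++ pvOutAcc cur ts := by
  induction ts with
  | nil =>
    intro players cur
    by_cases h : cur ≠ [] <;> simp [pvFin, pvOutAcc, pvEmit, h]
  | cons t ts ih =>
    intro players cur
    by_cases hp : t ∈ pvPositions
    · by_cases hc : cur ≠ [] <;>
        simp [List.foldl_cons, pvStepB, hp, hc, ih, pvOutAcc, pvEmit, List.append_assoc]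
    · simp [List.foldl_cons, pvStepB, hp, ih, pvOutAcc]

theorem pvFoldB_inactive (ts : List String) :
    ∀ players, pvFin (ts.foldl pvStepB (players, [], false)) = players ++ pvOutI ts := by
  induction ts with
  | nil => intro players; simp [pvFin, pvOutI]
  | cons t ts ih =>
    intro players
    by_cases hp : t ∈ pvPositions
    · simp [List.foldl_cons, pvStepB, hp, pvFoldB_active, pvOutI]
    · simp [List.foldl_cons, pvStepB, hp, ih, pvOutI]

theorem pvOutAcc_eq (ts : List String) :
    ∀ cur, pvOutAcc cur ts = pvEmit (cur ++ ts.takeWhile (· ∉ pvPositions)) ++ pvOut ts := by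
  induction ts with
  | nil => intro cur; simp [pvOutAcc, pvOut]
  | cons t ts ih =>
    intro cur
    by_cases hp : t ∈ pvPositions
    · simp [pvOutAcc, hp, pvOut, ih]
    · simp [pvOutAcc, hp, pvOut, ih]

theorem pvOutI_eq (ts : List String) : pvOutI ts = pvOut ts := by
  induction ts with
  | nil => rfl
  | cons t ts ih =>
    by_cases hp : t ∈ pvPositions
    · simp [pvOutI, hp, pvOut, pvOutAcc_eq]
    · simp [pvOutI, hp, pvOut, ih]

-- ===== VERDICT (by name: the statement is the Claim_ definition above) =====
theorem parse_lineup_spec : Claim_equal_parse_lineup := by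
  intro s _
  show parse_lineup s = parse_lineup_alt s
  have hB : parse_lineup_alt s = pvFin ((PySem.Str.split₀ s).foldl pvStepB ([], [], false)) := rfl
  rw [parse_lineup, pvLoopA_eq, hB, pvFoldB_inactive, pvOutI_eq]
  rfl
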